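-- pv_equiv track=rewrite | github.com/JakubFlash/Advent2023 | d12_springs.py | count_groups
-- ===== SOURCE A (Python) =====
-- def count_groups(fully_known_line_in : str) -> list[int]:
--     groups = []
--     group_counting = False
--     cur_size = 0
--     for symbol in fully_known_line_in:
--         if (symbol == '.' or symbol == '0') and group_counting:
--             groups.append(cur_size)
--             group_counting = False
--             cur_size = 0
--
--         elif symbol == '#' or symbol == '1':
--             group_counting = True
--             cur_size += 1
--
--     #finishing off the line with a group?
--     if group_counting:
--         groups.append(cur_size)
--     return groups
-- ===== SOURCE B (Python) =====
-- def count_groups(fully_known_line_in: str) -> list[int]: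
--     # partition-then-count: split on separators, count damaged cells per segment
--     segments = []
--     cur = []
--     for ch in fully_known_line_in:
--         if ch == '.' or ch == '0':
--             segments.append(cur)
--             cur = []
--         else:
--             cur.append(ch)
--     segments.append(cur)
--     counts = [sum(1 for c in seg if c == '#' or c == '1') for seg in segments]
--     return [c for c in counts if c > 0]
-- ===== Notes on version B (the rewrite author's own statement) =====
-- stated objective: alternative
-- what changed: Replaces the single-pass flag/counter state machine with a partition-then-count decomposition: split the line into segments at separator characters, count damaged cells in each segment, keep the positive counts.
import Mathlib
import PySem

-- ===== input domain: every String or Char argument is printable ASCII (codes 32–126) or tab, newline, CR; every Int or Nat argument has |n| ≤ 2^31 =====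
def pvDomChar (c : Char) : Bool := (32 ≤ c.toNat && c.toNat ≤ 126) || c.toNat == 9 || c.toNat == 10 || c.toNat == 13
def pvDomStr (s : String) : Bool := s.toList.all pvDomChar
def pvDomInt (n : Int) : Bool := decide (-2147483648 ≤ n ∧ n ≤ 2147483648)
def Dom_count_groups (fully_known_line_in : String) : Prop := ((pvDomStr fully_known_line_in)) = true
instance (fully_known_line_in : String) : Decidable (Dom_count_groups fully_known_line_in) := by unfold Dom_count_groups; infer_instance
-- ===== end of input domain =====

-- B changes the decomposition (partition on separators, then count per segment) instead of A's
-- flag/counter state machine; same cost, alternative structure.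

-- ===== PORT A =====
-- loop body of A: state = (groups, group_counting, cur_size)
def pvStepA (st : List Int × Bool × Int) (symbol : Char) : List Int × Bool × Int :=
  if (symbol == '.' || symbol == '0') && st.2.1 then (st.1 ++ [st.2.2], false, 0)
  else if symbol == '#' || symbol == '1' then (st.1, true, st.2.2 + 1)
  else st

def count_groups (fully_known_line_in : String) : List Int :=
  let st := fully_known_line_in.toList.foldl pvStepA ([], false, 0)
  if st.2.1 then st.1 ++ [st.2.2] else st.1

-- ===== PORT B =====
-- loop body of B: state = (segments, cur)
def pvStepB (st : List (List Char) × List Char) (ch : Char) : List (List Char) × List Char :=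
  if ch == '.' || ch == '0' then (st.1 ++ [st.2], []) else (st.1, st.2 ++ [ch])

def count_groups_alt (fully_known_line_in : String) : List Int :=
  let p := fully_known_line_in.toList.foldl pvStepB ([], [])
  let segments := p.1 ++ [p.2]
  let counts := segments.map (fun seg => (seg.countP (fun c => c == '#' || c == '1') : Int))
  counts.filter (fun c => decide (0 < c))

-- ===== PRECONDITION & SPEC =====
def Spec_count_groups (fully_known_line_in : String) (out : List Int) : Prop := out = count_groups_alt fully_known_line_in
instance (fully_known_line_in : String) (out : List Int) : Decidable (Spec_count_groups fully_known_line_in out) := by unfold Spec_count_groups; infer_instance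

-- ===== CLAIM (what is proved, stated in full; the proofs are below) =====
def Claim_equal_count_groups : Prop := ∀ (fully_known_line_in : String), Dom_count_groups fully_known_line_in → Spec_count_groups fully_known_line_in (count_groups fully_known_line_in)

-- ===== LEMMAS AND PROOFS =====

def pvDam (c : Char) : Bool := c == '#' || c == '1'
def pvSep (c : Char) : Bool := c == '.' || c == '0'

-- the recursive shape of B's split
def pvSplit (cur : List Char) : List Char → List (List Char)
  | [] => [cur]
  | c :: t => if pvSep c then cur :: pvSplit [] t else pvSplit (cur ++ [c]) t

def pvPos (segs : List (List Char)) : List Int :=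
  (segs.map (fun seg => (seg.countP pvDam : Int))).filter (fun c => decide (0 < c))

def pvFin (st : List Int × Bool × Int) : List Int :=
  if st.2.1 then st.1 ++ [st.2.2] else st.1

lemma pvPos_cons (seg : List Char) (rest : List (List Char)) :
    pvPos (seg :: rest) =
      (if 0 < (seg.countP pvDam : Int) then [(seg.countP pvDam : Int)] else []) ++ pvPos rest := by
  simp only [pvPos, List.map_cons, List.filter_cons]
  by_cases h : (0 : Int) < ((seg.countP pvDam : Nat) : Int)
  · rw [if_pos h, if_pos (decide_eq_true h)]
    rfl
  · rw [if_neg h, if_neg (by simpa using h)]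
    simp

lemma foldB_split : ∀ (l : List Char) (segs : List (List Char)) (cur : List Char),
    (l.foldl pvStepB (segs, cur)).1 ++ [(l.foldl pvStepB (segs, cur)).2]
      = segs ++ pvSplit cur l := by
  intro l
  induction l with
  | nil => intro segs cur; simp [pvSplit]
  | cons c t ih =>
    intro segs cur
    by_cases h : pvSep c = true
    · have e : pvStepB (segs, cur) c = (segs ++ [cur], []) := by
        simp only [pvStepB, pvSep] at h ⊢; rw [if_pos h]
      rw [List.foldl_cons, e, ih]
      simp [pvSplit, h]
    · have e : pvStepB (segs, cur) c = (segs, cur ++ [c]) := by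
        simp only [pvStepB, pvSep] at h ⊢; rw [if_neg h]
      rw [List.foldl_cons, e, ih]
      simp [pvSplit, h]

lemma foldA_split : ∀ (l : List Char) (gs : List Int) (cur : List Char),
    pvFin (l.foldl pvStepA (gs, decide (0 < cur.countP pvDam), (cur.countP pvDam : Int)))
      = gs ++ pvPos (pvSplit cur l) := by
  intro l
  induction l with
  | nil =>
    intro gs cur
    simp only [List.foldl_nil, pvFin, pvSplit, pvPos, List.map_cons, List.map_nil,
      List.filter_cons, List.filter_nil]
    by_cases h : 0 < cur.countP pvDam
    · have h' : (0 : Int) < (cur.countP pvDam : Int) := by exact_mod_cast h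
      rw [if_pos (decide_eq_true h), if_pos (decide_eq_true h')]
    · have h0 : cur.countP pvDam = 0 := by omega
      rw [if_neg (by rw [h0]; simp)]
      simp [h0]
  | cons c t ih =>
    intro gs cur
    by_cases hs : pvSep c = true
    · have hsplit : pvSplit cur (c :: t) = cur :: pvSplit [] t := by
        simp [pvSplit, hs]
      have ih0 := ih gs []
      have ih1 := ih (gs ++ [(cur.countP pvDam : Int)]) []
      simp only [List.countP_nil, Nat.cast_zero, Nat.lt_irrefl, decide_false] at ih0 ih1
      by_cases hk : 0 < cur.countP pvDam
      · have hk' : (0 : Int) < (cur.countP pvDam : Int) := by exact_mod_cast hk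
        have e : pvStepA (gs, decide (0 < cur.countP pvDam), (cur.countP pvDam : Int)) c
            = (gs ++ [(cur.countP pvDam : Int)], false, 0) := by
          simp only [pvStepA, pvSep] at hs ⊢
          rw [if_pos (by rw [hs, decide_eq_true hk]; rfl)]
        rw [List.foldl_cons, e, ih1, hsplit, pvPos_cons, if_pos hk', List.append_assoc]
      · have h0 : cur.countP pvDam = 0 := by omega
        have hk' : ¬ (0 : Int) < (cur.countP pvDam : Int) := by simp [h0]
        have hd : (c == '#' || c == '1') = false := by
          simp only [pvSep] at hs
          rcases Bool.or_eq_true_iff.mp hs with h | h <;>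
            simp [beq_iff_eq.mp h]
        have e : pvStepA (gs, decide (0 < cur.countP pvDam), (cur.countP pvDam : Int)) c
            = (gs, decide (0 < cur.countP pvDam), (cur.countP pvDam : Int)) := by
          simp only [pvStepA]
          rw [if_neg (by simp [hk]), if_neg (by simp [hd])]
        rw [List.foldl_cons, e, h0]
        simp only [Nat.cast_zero, Nat.lt_irrefl, decide_false] at ih0 ⊢
        rw [ih0, hsplit, pvPos_cons, h0]
        simp
    · have hsplit : pvSplit cur (c :: t) = pvSplit (cur ++ [c]) t := by
        simp [pvSplit, hs]
      have hns : (c == '.' || c == '0') = false := by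
        simpa [pvSep] using hs
      by_cases hdam : pvDam c = true
      · have hcnt : (cur ++ [c]).countP pvDam = cur.countP pvDam + 1 := by
          simp [List.countP_append, hdam]
        have e : pvStepA (gs, decide (0 < cur.countP pvDam), (cur.countP pvDam : Int)) c
            = (gs, true, (cur.countP pvDam : Int) + 1) := by
          simp only [pvStepA]
          rw [if_neg (by simp [hns]), if_pos (by simpa [pvDam] using hdam)]
        have ih1 := ih gs (cur ++ [c])
        rw [hcnt] at ih1
        have hb : decide (0 < cur.countP pvDam + 1) = true := by simp
        rw [hb] at ih1
        push_cast at ih1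
        rw [List.foldl_cons, e, hsplit, ← ih1]
      · have hnd : (c == '#' || c == '1') = false := by
          simpa [pvDam] using hdam
        have hcnt : (cur ++ [c]).countP pvDam = cur.countP pvDam := by
          simp [List.countP_append, hdam]
        have e : pvStepA (gs, decide (0 < cur.countP pvDam), (cur.countP pvDam : Int)) c
            = (gs, decide (0 < cur.countP pvDam), (cur.countP pvDam : Int)) := by
          simp only [pvStepA]
          rw [if_neg (by simp [hns]), if_neg (by simp [hnd])]
        have ih1 := ih gs (cur ++ [c])
        rw [hcnt] at ih1
        rw [List.foldl_cons, e, hsplit, ← ih1]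

-- ===== VERDICT (by name: the statement is the Claim_ definition above) =====
theorem count_groups_spec : Claim_equal_count_groups := by
  intro s _
  unfold Spec_count_groups
  have hA := foldA_split s.toList [] []
  have hB := foldB_split s.toList [] []
  simp only [List.countP_nil, Nat.cast_zero, Nat.lt_irrefl, decide_false, List.nil_append]
    at hA hB
  show pvFin (s.toList.foldl pvStepA ([], false, 0)) =
    (((s.toList.foldl pvStepB ([], [])).1 ++ [(s.toList.foldl pvStepB ([], [])).2]).map
      (fun seg => (seg.countP pvDam : Int))).filter (fun c => decide (0 < c))
  rw [hA, hB]
  rfl
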